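/- GENERATED by c/gen_decode.py: decode facts of the image, one per distinct instruction byte string. -/
import UserX.DecodeImage

#decode_all ProgX.Base.Dec
  "29d0"  -- sub eax,edx
  "480520008000"  -- add rax,0x800020
  "4883fe07"  -- cmp rsi,0x7
  "4889f3"  -- mov rbx,rsi
  "48be000000000000f03f"  -- movabs rsi,0x3ff0000000000000
  "4989f7"  -- mov r15,rsi
  "4c8b0c2538f01f00"  -- mov r9,QWORD PTR ds:0x1ff038
  "660f2fc8"  -- comisd xmm1,xmm0
  "73b6"  -- jae 101321
  "7624"  -- jbe 104239
  "81c7ff030000"  -- add edi,0x3ff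
  "ba01000000"  -- mov edx,0x1
  "e82af7ffff"  -- call 100059
  "e8b3f5ffff"  -- call 100059
  "eb06"  -- jmp 100e6e
  "f20f10055bdb0300"  -- movsd xmm0,QWORD PTR [rip+0x3db5b]
  "f20f5805cdda0300"  -- addsd xmm0,QWORD PTR [rip+0x3dacd]
  "f20f59d8"  -- mulsd xmm3,xmm0
  "f20f5e1db0e10300"  -- divsd xmm3,QWORD PTR [rip+0x3e1b0]
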